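-- pv_equiv track=rewrite | github.com/Thanhtinh06/baitapbigo | BaiFinal/Bai6.py | convertPassWord
-- ===== SOURCE A (Python) =====
-- def convertPassWord(password):
--     strEven = ''
--     term = ''
--     ans = ''
--     for i in range (len(password)):
--       if i % 2 != 0:
--         strEven += password[i]
--         term += '_'
--       else:
--         term += password[i]
--     strEvenReverve = strEven[::-1]
--     i = 0
--     for item in term:
--       if item == '_':
--         ans += strEvenReverve[i]
--         i += 1
--       else:
--         ans += item
--     return ans
-- ===== SOURCE B (Python) =====
-- def convertPassWord(password):
--     chars = list(password)
--     n = len(chars)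
--     i = 1
--     j = n - 1 if n % 2 == 0 else n - 2
--     while i < j:
--         chars[i], chars[j] = chars[j], chars[i]
--         i += 2
--         j -= 2
--     return ''.join(chars)
-- ===== Notes on version B (the rewrite author's own statement) =====
-- stated objective: simpler
-- what changed: Replaces A's two-pass sentinel scheme (extract odd chars, leave a '_' mask, then rebuild consuming the reversed extract) by a single in-place two-pointer swap of the odd positions on a char list.
-- outside the precondition, e.g. on convertPassWord('_'): A raises IndexError, B returns '_'
-- crash fix: On passwords with '_' at an even index A raises IndexError (the mask then has more '_' slots than extracted odd characters); B simply returns the string with its odd-indexed characters reversed. — e.g. on convertPassWord("_ab"): A raises IndexError, B returns "_ab"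
import Mathlib
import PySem

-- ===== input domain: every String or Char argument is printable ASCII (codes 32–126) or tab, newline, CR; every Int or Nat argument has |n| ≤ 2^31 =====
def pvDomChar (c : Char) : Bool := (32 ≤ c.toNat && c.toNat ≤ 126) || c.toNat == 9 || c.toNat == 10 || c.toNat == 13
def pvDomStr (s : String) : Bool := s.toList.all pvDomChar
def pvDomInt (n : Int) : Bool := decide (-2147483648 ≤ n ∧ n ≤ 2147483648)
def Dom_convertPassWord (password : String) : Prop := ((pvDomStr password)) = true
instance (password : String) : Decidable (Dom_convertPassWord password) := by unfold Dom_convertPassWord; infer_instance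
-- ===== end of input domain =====

-- B replaces A's sentinel-mask rebuild by a two-pointer in-place swap of the odd positions (simpler).

-- ===== PORT A =====
-- first loop body: collect odd-indexed chars into strEven, build term with '_' at odd slots.
-- password[i] for i in range(len(password)) is always in range, so getD is exact here.
def pvStep1 (p : List Char) (st : List Char × List Char) (i : Nat) : List Char × List Char :=
  if i % 2 ≠ 0 then (st.1 ++ [p.getD i ' '], st.2 ++ ['_'])
  else (st.1, st.2 ++ [p.getD i ' '])

-- second loop body: rebuild, consuming strEvenReverve at each '_'.
-- strEvenReverve[i] raises IndexError exactly on the inputs Pre_ excludes; getD is exact under Pre_.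
def pvStep2 (rev : List Char) (st : List Char × Nat) (item : Char) : List Char × Nat :=
  if item = '_' then (st.1 ++ [rev.getD st.2 ' '], st.2 + 1)
  else (st.1 ++ [item], st.2)

def convertPassWord (password : String) : String :=
  let p := password.toList
  let st := (List.range p.length).foldl (pvStep1 p) ([], [])
  let strEvenReverve := st.1.reverse   -- strEven[::-1] is list reversal (exact)
  let r := st.2.foldl (pvStep2 strEvenReverve) (([] : List Char), 0)
  String.ofList r.1

-- ===== PORT B =====
-- the while-loop of Source B: swap chars[i], chars[j], advance i += 2, j -= 2; the fuel argument
-- only makes the loop total (any fuel ≥ j - i gives the loop's value, see pvSwapLoop_getD below).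
-- chars[i]/chars[j] are in range whenever the loop body runs, so getD is exact.
def pvSwapLoop : Nat → List Char → Nat → Nat → List Char
  | 0, cs, _, _ => cs
  | fuel + 1, cs, i, j =>
      if i < j then
        pvSwapLoop fuel ((cs.set i (cs.getD j ' ')).set j (cs.getD i ' ')) (i + 2) (j - 2)
      else cs

def convertPassWord_alt (password : String) : String :=
  let cs := password.toList
  let n := cs.length
  let j := if n % 2 = 0 then n - 1 else n - 2
  String.ofList (pvSwapLoop n cs 1 j)

-- ===== PRECONDITION & SPEC =====
-- Pre_ excludes exactly the passwords containing '_' at an even index: there A's second loop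
-- runs out of reversed odd characters and raises IndexError (A returns no value there).
def Pre_convertPassWord (password : String) : Prop :=
  ∀ k, k < password.toList.length → k % 2 = 0 → password.toList.getD k ' ' ≠ '_'
instance (password : String) : Decidable (Pre_convertPassWord password) := by
  unfold Pre_convertPassWord; infer_instance

def pvWitness_convertPassWord : String := "abcde"

-- On passwords with '_' at an even index A raises IndexError (the mask has more '_' slots than
-- extracted odd characters); B returns the string with its odd-indexed characters reversed.
def Raises_convertPassWord (password : String) : Prop :=
  ∃ k, k < password.toList.length ∧ k % 2 = 0 ∧ password.toList.getD k ' ' = '_'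
instance (password : String) : Decidable (Raises_convertPassWord password) := by
  unfold Raises_convertPassWord; infer_instance

def pvRaiseWitness_convertPassWord : String := "_ab"
def pvRaiseWitnessOut_convertPassWord : String := "_ab"

def Spec_convertPassWord (password : String) (out : String) : Prop := out = convertPassWord_alt password
instance (password : String) (out : String) : Decidable (Spec_convertPassWord password out) := by unfold Spec_convertPassWord; infer_instance

-- ===== CLAIM (what is proved, stated in full; the proofs are below) =====
def Claim_equal_convertPassWord : Prop := ∀ (password : String), Dom_convertPassWord password → Pre_convertPassWord password → Spec_convertPassWord password (convertPassWord password)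
def Claim_raises_convertPassWord : Prop := (∀ (password : String), Dom_convertPassWord password → Raises_convertPassWord password → ¬ Pre_convertPassWord password) ∧ (Dom_convertPassWord (pvRaiseWitness_convertPassWord) ∧ Raises_convertPassWord (pvRaiseWitness_convertPassWord) ∧ convertPassWord_alt (pvRaiseWitness_convertPassWord) = pvRaiseWitnessOut_convertPassWord)

-- ===== LEMMAS AND PROOFS =====

-- getD through List.set
lemma pv_getD_set (cs : List Char) (i k : Nat) (a d : Char) :
    (cs.set i a).getD k d = if i = k ∧ k < cs.length then a else cs.getD k d := by
  simp [List.getD_eq_getElem?_getD, List.getElem?_set]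
  split_ifs <;> simp_all

lemma pv_getD_reverse (l : List Char) (k : Nat) (h : k < l.length) (d : Char) :
    l.reverse.getD k d = l.getD (l.length - 1 - k) d := by
  rw [List.getD_eq_getElem _ _ (by simpa using h), List.getD_eq_getElem _ _ (by omega)]
  simp [List.getElem_reverse]

-- characterization of A's first loop
def pvE (p : List Char) (m : Nat) : List Char :=
  ((List.range m).filter (fun i => i % 2 = 1)).map (fun i => p.getD i ' ')
def pvT (p : List Char) (m : Nat) : List Char :=
  (List.range m).map (fun i => if i % 2 = 1 then '_' else p.getD i ' ')

lemma pv_loop1 (p : List Char) (m : Nat) :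
    (List.range m).foldl (pvStep1 p) ([], []) = (pvE p m, pvT p m) := by
  induction m with
  | zero => rfl
  | succ m ih =>
      rw [List.range_succ, List.foldl_append, ih]
      by_cases h : m % 2 = 1 <;>
        simp [pvStep1, pvE, pvT, List.range_succ, h]

-- the filtered odd indices are 2j+1 for j < m/2
lemma pv_filter_odd (m : Nat) :
    (List.range m).filter (fun i => i % 2 = 1) = (List.range (m / 2)).map (fun j => 2 * j + 1) := by
  induction m with
  | zero => rfl
  | succ m ih =>
      rw [List.range_succ, List.filter_append]
      by_cases h : m % 2 = 1
      · have h2 : (m + 1) / 2 = m / 2 + 1 := by omega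
        have h3 : 2 * (m / 2) + 1 = m := by omega
        simp [h, ih, h2, List.range_succ, h3]
      · have h2 : (m + 1) / 2 = m / 2 := by omega
        simp [h, ih, h2]

-- characterization of A's second loop under Pre_ : the first m positions rebuilt
def pvT' (p rev : List Char) (m : Nat) : List Char :=
  (List.range m).map (fun k => if k % 2 = 1 then rev.getD (k / 2) ' ' else p.getD k ' ')

lemma pv_loop2 (p rev : List Char) (m : Nat) (hm : m ≤ p.length)
    (hpre : ∀ k, k < p.length → k % 2 = 0 → p.getD k ' ' ≠ '_') :
    (pvT p m).foldl (pvStep2 rev) ([], 0) = (pvT' p rev m, m / 2) := by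
  induction m with
  | zero => rfl
  | succ m ih =>
      have hm' : m ≤ p.length := by omega
      have step : pvT p (m + 1) = pvT p m ++ [if m % 2 = 1 then '_' else p.getD m ' '] := by
        simp [pvT, List.range_succ]
      rw [step, List.foldl_append, ih hm']
      by_cases h : m % 2 = 1
      · have h2 : (m + 1) / 2 = m / 2 + 1 := by omega
        simp [pvStep2, pvT', List.range_succ, h, h2]
      · have hne : p.getD m ' ' ≠ '_' := hpre m (by omega) (by omega)
        rw [List.getD_eq_getElem?_getD] at hne
        have h2 : (m + 1) / 2 = m / 2 := by omega
        simp [pvStep2, pvT', List.range_succ, h, hne, h2]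

-- index value of the reversed odd extract
lemma pv_rev_getD (p : List Char) (k : Nat) (hk : k < p.length) (hodd : k % 2 = 1) :
    ((pvE p p.length).reverse).getD (k / 2) ' ' = p.getD (2 * (p.length / 2) - k) ' ' := by
  have hE : pvE p p.length = (List.range (p.length / 2)).map (fun j => p.getD (2 * j + 1) ' ') := by
    rw [pvE, pv_filter_odd, List.map_map]; rfl
  have hlen : (pvE p p.length).length = p.length / 2 := by simp [hE]
  have hk2 : k / 2 < p.length / 2 := by omega
  rw [pv_getD_reverse _ _ (by simpa [hlen] using hk2), hlen, hE,
      PySem.List.getD_map_range _ _ _ _ (by omega)]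
  congr 1
  omega

-- pointwise characterization of the swap loop (any sufficient fuel)
lemma pvSwapLoop_getD (m : Nat) : ∀ (cs : List Char) (i j : Nat), j - i ≤ m →
    (i < j → j < cs.length) → (j - i) % 2 = 0 → ∀ k d,
    (pvSwapLoop m cs i j).getD k d =
      if i ≤ k ∧ k ≤ j ∧ (k - i) % 2 = 0 then cs.getD (i + j - k) d else cs.getD k d := by
  induction m with
  | zero =>
      intro cs i j hm hlen hpar k d
      simp only [pvSwapLoop]
      split_ifs with h
      · have : i + j - k = k := by omega
        rw [this]
      · rfl
  | succ m ih =>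
      intro cs i j hm hlen hpar k d
      simp only [pvSwapLoop]
      by_cases hij : i < j
      · rw [if_pos hij]
        have hj : j < cs.length := hlen hij
        have hij2 : i + 2 ≤ j := by omega
        have hlen' : ((cs.set i (cs.getD j ' ')).set j (cs.getD i ' ')).length = cs.length := by
          simp
        have hget : ∀ x dd, ((cs.set i (cs.getD j ' ')).set j (cs.getD i ' ')).getD x dd =
            if x = j then cs.getD i dd else if x = i then cs.getD j dd else cs.getD x dd := by
          intro x dd
          have hid : cs.getD i ' ' = cs.getD i dd := by
            rw [List.getD_eq_getElem _ _ (by omega), List.getD_eq_getElem _ _ (by omega)]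
          have hjd : cs.getD j ' ' = cs.getD j dd := by
            rw [List.getD_eq_getElem _ _ hj, List.getD_eq_getElem _ _ hj]
          rw [pv_getD_set, pv_getD_set, List.length_set]
          rcases eq_or_ne x j with rfl | hxj
          · rw [if_pos ⟨rfl, hj⟩, if_pos rfl, hid]
          · rw [if_neg (fun hc => hxj hc.1.symm), if_neg hxj]
            rcases eq_or_ne x i with rfl | hxi
            · rw [if_pos ⟨rfl, by omega⟩, if_pos rfl, hjd]
            · rw [if_neg (fun hc => hxi hc.1.symm), if_neg hxi]
        rw [ih _ (i + 2) (j - 2) (by omega) (by intro _; rw [hlen']; omega) (by omega) k d]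
        by_cases h1 : i + 2 ≤ k ∧ k ≤ j - 2 ∧ (k - (i + 2)) % 2 = 0
        · -- strictly inside: untouched by this swap
          have h2 : i ≤ k ∧ k ≤ j ∧ (k - i) % 2 = 0 := by omega
          rw [if_pos h1, if_pos h2, hget, if_neg (by omega), if_neg (by omega)]
          congr 1
          omega
        · rw [if_neg h1]
          by_cases h2 : i ≤ k ∧ k ≤ j ∧ (k - i) % 2 = 0
          · -- boundary: k = i or k = j
            have hk : k = i ∨ k = j := by omega
            rw [if_pos h2, hget]
            rcases hk with rfl | rfl
            · rw [if_neg (by omega), if_pos rfl]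
              congr 1
              omega
            · rw [if_pos rfl]
              congr 1
              omega
          · -- outside the region
            rw [if_neg h2, hget, if_neg (by omega), if_neg (by omega)]
      · rw [if_neg hij]
        split_ifs with h
        · have : i + j - k = k := by omega
          rw [this]
        · rfl

lemma pvSwapLoop_length (m : Nat) : ∀ (cs : List Char) (i j : Nat),
    (pvSwapLoop m cs i j).length = cs.length := by
  induction m with
  | zero => intro cs i j; rfl
  | succ m ih =>
      intro cs i j
      simp only [pvSwapLoop]
      split_ifs
      · rw [ih]; simp
      · rfl

lemma pv_ext_getD (l1 l2 : List Char) (h : l1.length = l2.length)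
    (h2 : ∀ k, k < l1.length → l1.getD k ' ' = l2.getD k ' ') : l1 = l2 := by
  apply List.ext_getElem h
  intro k hk1 hk2
  have := h2 k hk1
  rwa [List.getD_eq_getElem _ _ hk1, List.getD_eq_getElem _ _ hk2] at this

-- ===== VERDICT (by name: the statement is the Claim_ definition above) =====
theorem convertPassWord_spec : Claim_equal_convertPassWord := by
  intro password _ hpre
  have hpre' : ∀ k, k < password.toList.length → k % 2 = 0 →
      password.toList.getD k ' ' ≠ '_' := hpre
  unfold Spec_convertPassWord convertPassWord convertPassWord_alt
  simp only [pv_loop1,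
    pv_loop2 password.toList ((pvE password.toList password.toList.length).reverse)
      password.toList.length le_rfl hpre']
  refine congrArg String.ofList ?_
  apply pv_ext_getD
  · rw [pvSwapLoop_length]
    simp [pvT']
  · intro k hk
    have hk' : k < password.toList.length := by simpa [pvT'] using hk
    rw [pvT', PySem.List.getD_map_range _ _ _ _ hk']
    rw [pvSwapLoop_getD password.toList.length password.toList 1 _ (by split_ifs <;> omega)
      (by intro h; split_ifs at * <;> omega) (by split_ifs <;> omega) k ' ']
    by_cases hodd : k % 2 = 1
    · have hkj : k ≤ (if password.toList.length % 2 = 0 then password.toList.length - 1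
          else password.toList.length - 2) := by split_ifs <;> omega
      rw [if_pos hodd, if_pos ⟨by omega, hkj, by omega⟩,
        pv_rev_getD password.toList k hk' hodd]
      congr 1
      split_ifs <;> omega
    · rw [if_neg hodd, if_neg (fun hc => by omega)]

@[simp] theorem convertPassWord_raises : Claim_raises_convertPassWord := by
  unfold Claim_raises_convertPassWord
  constructor
  · rintro password _ ⟨k, hk, he, hv⟩ hpre
    exact hpre k hk he hv
  · exact ⟨by decide, ⟨0, by decide⟩, by decide⟩
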